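-- pv_equiv track=rewrite | github.com/trevorWieland/unicorn-armada | src/unicorn_armada/solver.py | swap_delta
-- ===== SOURCE A (Python) =====
-- def swap_delta(
--     left_cluster: int,
--     right_cluster: int,
--     left_unit: list[int],
--     right_unit: list[int],
--     cluster_rapports: list[list[int]],
-- ) -> int:
--     left_before = sum(
--         cluster_rapports[left_cluster][other]
--         for other in left_unit
--         if other != left_cluster
--     )
--     right_before = sum(
--         cluster_rapports[right_cluster][other]
--         for other in right_unit
--         if other != right_cluster
--     )
--     left_after = sum(
--         cluster_rapports[left_cluster][other]
--         for other in right_unit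
--         if other != right_cluster
--     )
--     right_after = sum(
--         cluster_rapports[right_cluster][other]
--         for other in left_unit
--         if other != left_cluster
--     )
--     return (left_after + right_after) - (left_before + right_before)
-- ===== SOURCE B (Python) =====
-- def swap_delta(
--     left_cluster: int,
--     right_cluster: int,
--     left_unit: list[int],
--     right_unit: list[int],
--     cluster_rapports: list[list[int]],
-- ) -> int:
--     # Aggregate both unit lists into one signed-multiplicity table first
--     # (+1 per kept left element, -1 per kept right element), then charge
--     # each distinct index once, weighted by its net count.
--     counts: dict[int, int] = {}
--     for other in left_unit:
--         if other != left_cluster: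
--             counts[other] = counts.get(other, 0) + 1
--     for other in right_unit:
--         if other != right_cluster:
--             counts[other] = counts.get(other, 0) - 1
--     total = 0
--     for other, c in counts.items():
--         total += c * (
--             cluster_rapports[right_cluster][other]
--             - cluster_rapports[left_cluster][other]
--         )
--     return total
-- ===== Notes on version B (the rewrite author's own statement) =====
-- stated objective: alternative
-- what changed: Instead of four direct filtered sums, B first aggregates both unit lists into one dict of signed multiplicities (+1 per kept left element, -1 per kept right element) and then charges each distinct index once, multiplying its net count by the rapport-row difference.
import Mathlib
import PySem

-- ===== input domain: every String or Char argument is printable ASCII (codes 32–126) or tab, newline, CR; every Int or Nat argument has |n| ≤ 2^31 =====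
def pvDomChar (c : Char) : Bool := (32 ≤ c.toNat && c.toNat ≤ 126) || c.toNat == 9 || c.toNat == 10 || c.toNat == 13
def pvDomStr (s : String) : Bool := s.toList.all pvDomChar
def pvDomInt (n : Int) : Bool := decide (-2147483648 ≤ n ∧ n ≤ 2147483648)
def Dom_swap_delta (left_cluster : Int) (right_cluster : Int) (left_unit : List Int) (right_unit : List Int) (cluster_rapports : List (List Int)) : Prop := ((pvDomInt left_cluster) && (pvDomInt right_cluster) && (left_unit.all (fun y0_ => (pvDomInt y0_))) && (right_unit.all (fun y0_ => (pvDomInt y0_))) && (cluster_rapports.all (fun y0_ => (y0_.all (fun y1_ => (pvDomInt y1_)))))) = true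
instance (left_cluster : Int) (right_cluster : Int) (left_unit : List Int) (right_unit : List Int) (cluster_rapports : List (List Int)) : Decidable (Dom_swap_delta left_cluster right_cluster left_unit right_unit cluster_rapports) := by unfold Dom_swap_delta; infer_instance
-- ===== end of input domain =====

-- B replaces A's four filtered generator sums by a different algorithm: it first
-- aggregates both unit lists into one dict of signed multiplicities, then charges
-- each distinct index once, weighted by its net count.

-- cluster_rapports[c][other]; `getD` defaults are never reached under Pre_ (both indexings in range).
def pvIdx2 (rap : List (List Int)) (c o : Int) : Int :=
  ((PySem.List.pyGet? ((PySem.List.pyGet? rap c).getD []) o)).getD 0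

-- ===== PORT A =====
def swap_delta (left_cluster : Int) (right_cluster : Int) (left_unit : List Int) (right_unit : List Int) (cluster_rapports : List (List Int)) : Int :=
  let left_before := left_unit.foldl
    (fun acc other => if other ≠ left_cluster then acc + pvIdx2 cluster_rapports left_cluster other else acc) 0
  let right_before := right_unit.foldl
    (fun acc other => if other ≠ right_cluster then acc + pvIdx2 cluster_rapports right_cluster other else acc) 0
  let left_after := right_unit.foldl
    (fun acc other => if other ≠ right_cluster then acc + pvIdx2 cluster_rapports left_cluster other else acc) 0
  let right_after := left_unit.foldl
    (fun acc other => if other ≠ left_cluster then acc + pvIdx2 cluster_rapports right_cluster other else acc) 0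
  (left_after + right_after) - (left_before + right_before)

-- ===== PORT B =====
-- counts[other] += 1 / -= 1  (Python 'counts[other] = counts.get(other, 0) ± 1')
def swap_delta_alt (left_cluster : Int) (right_cluster : Int) (left_unit : List Int) (right_unit : List Int) (cluster_rapports : List (List Int)) : Int :=
  let counts : PySem.Dict Int Int := left_unit.foldl
    (fun d other => if other ≠ left_cluster then d.insert other (d.getD other 0 + 1) else d)
    PySem.Dict.empty
  let counts := right_unit.foldl
    (fun d other => if other ≠ right_cluster then d.insert other (d.getD other 0 - 1) else d)
    counts
  counts.items.foldl
    (fun total p => total + p.2 *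
      (pvIdx2 cluster_rapports right_cluster p.1 - pvIdx2 cluster_rapports left_cluster p.1))
    0

-- ===== PRECONDITION & SPEC =====
-- an index pair (c, o) is in range (Python: cluster_rapports[c][o] does not raise):
-- c indexes the outer list and o indexes the selected row (negative Python indices allowed)
def pvOk (rap : List (List Int)) (c o : Int) : Prop :=
  PySem.Raise.InRange rap.length c ∧
  PySem.Raise.InRange ((PySem.List.pyGet? rap c).getD []).length o

-- Pre_ excludes exactly the inputs on which A raises IndexError: some summed access
-- cluster_rapports[·][other] is out of range (both programs raise there).
def Pre_swap_delta (left_cluster : Int) (right_cluster : Int) (left_unit : List Int) (right_unit : List Int) (cluster_rapports : List (List Int)) : Prop :=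
  (∀ o ∈ left_unit, o ≠ left_cluster → pvOk cluster_rapports left_cluster o ∧ pvOk cluster_rapports right_cluster o) ∧
  (∀ o ∈ right_unit, o ≠ right_cluster → pvOk cluster_rapports left_cluster o ∧ pvOk cluster_rapports right_cluster o)
instance (left_cluster : Int) (right_cluster : Int) (left_unit : List Int) (right_unit : List Int) (cluster_rapports : List (List Int)) : Decidable (Pre_swap_delta left_cluster right_cluster left_unit right_unit cluster_rapports) := by unfold Pre_swap_delta pvOk; infer_instance

def pvWitness_swap_delta : Int × Int × List Int × List Int × List (List Int) :=
  (0, 1, [1, 2], [0, 2], [[0, 3, -2], [5, 0, 7], [1, 1, 0]])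

def Spec_swap_delta (left_cluster : Int) (right_cluster : Int) (left_unit : List Int) (right_unit : List Int) (cluster_rapports : List (List Int)) (out : Int) : Prop := out = swap_delta_alt left_cluster right_cluster left_unit right_unit cluster_rapports
instance (left_cluster : Int) (right_cluster : Int) (left_unit : List Int) (right_unit : List Int) (cluster_rapports : List (List Int)) (out : Int) : Decidable (Spec_swap_delta left_cluster right_cluster left_unit right_unit cluster_rapports out) := by unfold Spec_swap_delta; infer_instance

-- ===== CLAIM (what is proved, stated in full; the proofs are below) =====
def Claim_equal_swap_delta : Prop := ∀ (left_cluster : Int) (right_cluster : Int) (left_unit : List Int) (right_unit : List Int) (cluster_rapports : List (List Int)), Dom_swap_delta left_cluster right_cluster left_unit right_unit cluster_rapports → Pre_swap_delta left_cluster right_cluster left_unit right_unit cluster_rapports → Spec_swap_delta left_cluster right_cluster left_unit right_unit cluster_rapports (swap_delta left_cluster right_cluster left_unit right_unit cluster_rapports)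

-- ===== LEMMAS AND PROOFS =====

-- weighted sum of a dict: Σ value * g key, over the items in order
def pvWsum (g : Int → Int) (d : PySem.Dict Int Int) : Int :=
  (d.items.map (fun p => p.2 * g p.1)).sum

-- the dict's keys are distinct (holds for every dict built from empty by insert)
def pvKN (d : PySem.Dict Int Int) : Prop := (d.items.map Prod.fst).Nodup

-- replacing (in place) the unique entry at key k by (k, pr.2 + δ) bumps the weighted sum by δ * g k
theorem pv_repl_sum (g : Int → Int) (k δ : Int) :
    ∀ (l : List (Int × Int)), (l.map Prod.fst).Nodup →
    ∀ pr : Int × Int, l.find? (fun p => p.1 == k) = some pr →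
    ((l.map (fun p => if (p.1 == k) = true then (k, pr.2 + δ) else p)).map (fun p => p.2 * g p.1)).sum
      = (l.map (fun p => p.2 * g p.1)).sum + δ * g k := by
  intro l
  induction l with
  | nil => intro _ pr h; simp [List.find?] at h
  | cons q t ih =>
    intro hnd pr hf
    simp only [List.map_cons, List.nodup_cons] at hnd
    rw [List.find?_cons] at hf
    by_cases hq : (q.1 == k) = true
    · simp only [hq] at hf
      injection hf with hf; subst hf
      have hk : q.1 = k := by simpa using hq
      have htail : t.map (fun p => if (p.1 == k) = true then (k, q.2 + δ) else p) = t.map id := by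
        apply List.map_congr_left
        intro r hr
        have hne : r.1 ≠ k := by
          intro he
          exact hnd.1 (by rw [← hk] at he; exact (List.mem_map.mpr ⟨r, hr, he⟩))
        simp [hne]
      simp only [List.map_cons, hq, if_true, htail, List.map_id, List.sum_cons]
      rw [← hk]; ring
    · rw [Bool.not_eq_true] at hq
      simp only [hq] at hf
      simp only [List.map_cons, hq, Bool.false_eq_true, if_false, List.sum_cons]
      rw [ih hnd.2 pr hf]; ring

-- 'counts[k] = counts.get(k, 0) + δ' bumps the weighted sum by δ * g k and keeps keys distinct
theorem pv_insert_bump (g : Int → Int) (k δ : Int) (d : PySem.Dict Int Int) (h : pvKN d) :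
    pvWsum g (d.insert k (d.getD k 0 + δ)) = pvWsum g d + δ * g k ∧
    pvKN (d.insert k (d.getD k 0 + δ)) := by
  by_cases hc : d.contains k = true
  · -- key present: in-place replacement
    have hsome : (d.items.find? (fun p => p.1 == k)).isSome = true := by
      rw [List.find?_isSome]
      simpa [PySem.Dict.contains, List.any_eq_true] using hc
    obtain ⟨pr, hpr⟩ := Option.isSome_iff_exists.mp hsome
    have hgetD : d.getD k 0 = pr.2 := by
      simp [PySem.Dict.getD, PySem.Dict.get?, hpr]
    constructor
    · simp only [PySem.Dict.insert, hc, if_true, pvWsum, hgetD]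
      exact pv_repl_sum g k δ d.items h pr hpr
    · simp only [PySem.Dict.insert, hc, if_true, pvKN]
      rw [List.map_map]
      have hco : (Prod.fst ∘ fun p : Int × Int => if (p.1 == k) = true then (k, d.getD k 0 + δ) else p) = Prod.fst := by
        funext r
        by_cases hr : r.1 = k
        · simp [hr]
        · simp [hr]
      rw [hco]; exact h
  · -- key absent: append
    have hnone : d.items.find? (fun p => p.1 == k) = none := by
      rw [List.find?_eq_none]
      intro p hp hpk
      exact hc (by simp only [PySem.Dict.contains, List.any_eq_true]; exact ⟨p, hp, hpk⟩)
    have hgetD : d.getD k 0 = 0 := by simp [PySem.Dict.getD, PySem.Dict.get?, hnone]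
    have hcb : d.contains k = false := by simpa using hc
    constructor
    · simp [PySem.Dict.insert, hcb, pvWsum, hgetD]
    · simp only [PySem.Dict.insert, hcb, Bool.false_eq_true, if_false, pvKN, List.map_append,
        List.map_cons, List.map_nil]
      refine List.Nodup.append h (List.nodup_singleton k) ?_
      intro a ha hb
      have hak : a = k := by simpa using hb
      subst hak
      apply hc
      simp only [PySem.Dict.contains, List.any_eq_true]
      rcases List.mem_map.mp ha with ⟨p, hp, hpk⟩
      exact ⟨p, hp, by simpa using hpk⟩

-- one counting loop bumps the weighted sum by δ * Σ g over the kept elements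
theorem pv_loop_bump (g : Int → Int) (p : Int → Prop) [DecidablePred p] (δ : Int) (l : List Int) :
    ∀ d : PySem.Dict Int Int, pvKN d →
      pvWsum g (l.foldl (fun d x => if p x then d.insert x (d.getD x 0 + δ) else d) d)
        = pvWsum g d + δ * ((l.filter (fun x => decide (p x))).map g).sum ∧
      pvKN (l.foldl (fun d x => if p x then d.insert x (d.getD x 0 + δ) else d) d) := by
  induction l with
  | nil => intro d hd; exact ⟨by simp, hd⟩
  | cons x t ih =>
    intro d hd
    by_cases hx : p x
    · have hb := pv_insert_bump g x δ d hd
      have hrec := ih (d.insert x (d.getD x 0 + δ)) hb.2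
      simp only [List.foldl_cons, if_true, List.filter_cons, decide_eq_true_eq, hx,
        List.map_cons, List.sum_cons]
      refine ⟨?_, hrec.2⟩
      rw [hrec.1, hb.1]; ring
    · have hrec := ih d hd
      simp only [List.foldl_cons, hx, if_false, List.filter_cons, decide_eq_true_eq]
      simpa [hx] using hrec

theorem pv_sum_map_sub (f h : Int → Int) (l : List Int) :
    (l.map (fun x => f x - h x)).sum = (l.map f).sum - (l.map h).sum := by
  induction l with
  | nil => simp
  | cons x t ih => simp only [List.map_cons, List.sum_cons, ih]; ring

theorem swap_delta_eq_alt (lc rc : Int) (lu ru : List Int) (rap : List (List Int)) :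
    swap_delta lc rc lu ru rap = swap_delta_alt lc rc lu ru rap := by
  unfold swap_delta swap_delta_alt
  have ha : ∀ (c : Int) (l : List Int) (f : Int → Int),
      l.foldl (fun acc o => if o ≠ c then acc + f o else acc) 0
        = ((l.filter (fun o => decide (o ≠ c))).map f).sum := by
    intro c l f
    rw [PySem.List.foldl_ite_eq_foldl_filter, PySem.List.foldl_add]
    simp
  set g : Int → Int := fun o => pvIdx2 rap rc o - pvIdx2 rap lc o with hg
  have hsub : (fun (d : PySem.Dict Int Int) (o : Int) =>
        if o ≠ rc then d.insert o (d.getD o 0 - 1) else d)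
      = (fun d o => if o ≠ rc then d.insert o (d.getD o 0 + (-1)) else d) := by
    funext d o; rw [sub_eq_add_neg]
  have hKN0 : pvKN (PySem.Dict.empty : PySem.Dict Int Int) := by
    simp [pvKN, PySem.Dict.empty]
  have h1 := pv_loop_bump g (fun o => o ≠ lc) 1 lu PySem.Dict.empty hKN0
  have h2 := pv_loop_bump g (fun o => o ≠ rc) (-1) ru _ h1.2
  rw [hsub, ha, ha, ha, ha]
  have hfin : ∀ d : PySem.Dict Int Int,
      d.items.foldl (fun total p => total + p.2 * (pvIdx2 rap rc p.1 - pvIdx2 rap lc p.1)) 0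
        = pvWsum g d := by
    intro d
    rw [PySem.List.foldl_add (g := fun p : Int × Int => p.2 * g p.1)]
    simp [pvWsum]
  rw [hfin, h2.1, h1.1]
  have hw0 : pvWsum g (PySem.Dict.empty : PySem.Dict Int Int) = 0 := by
    simp [pvWsum, PySem.Dict.empty]
  rw [hw0, hg]
  rw [pv_sum_map_sub (pvIdx2 rap rc) (pvIdx2 rap lc) (lu.filter (fun o => decide (o ≠ lc)))]
  rw [pv_sum_map_sub (pvIdx2 rap rc) (pvIdx2 rap lc) (ru.filter (fun o => decide (o ≠ rc)))]
  ring

-- ===== VERDICT (by name: the statement is the Claim_ definition above) =====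
theorem swap_delta_spec : Claim_equal_swap_delta := by
  intro lc rc lu ru rap _ _
  unfold Spec_swap_delta
  exact swap_delta_eq_alt lc rc lu ru rap
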